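-- pv_equiv track=rewrite | github.com/berkaydemirtas/Database-Implementation | src/haloSoftware.py | pageToList
-- ===== SOURCE A (Python) =====
-- def pageToList(page):
--     listOfRecords = []
--     for i in range(7):
--         record = []
--         for j in range(14):
--             record.append(page[i*280 + j*20:i*280 + 20 + j*20].rstrip())
--         listOfRecords.append(record)
--     return listOfRecords
-- ===== SOURCE B (Python) =====
-- def pageToList(page):
--     # Single streaming pass: normalise the buffer to exactly 7*14*20 chars (truncate, pad with spaces;
--     # rstrip erases the padding), then walk it character by character, closing a
--     # field every 20 chars and a row every 14 fields.
--     buf = page[:1960].ljust(1960)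
--     out, row, field = [], [], []
--     for ch in buf:
--         field.append(ch)
--         if len(field) == 20:
--             row.append(''.join(field).rstrip())
--             field = []
--             if len(row) == 14:
--                 out.append(row)
--                 row = []
--     return out
-- ===== Notes on version B (the rewrite author's own statement) =====
-- stated objective: alternative
-- what changed: Replaces A's nested index loops with absolute-offset slicing (page[i*280+j*20 : ...]) by a single streaming pass: the buffer is normalised to exactly 1960 chars (truncate + space-pad, which rstrip erases) and walked character by character with an accumulator that closes a field every 20 chars and a row every 14 fields.
import Mathlib
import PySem

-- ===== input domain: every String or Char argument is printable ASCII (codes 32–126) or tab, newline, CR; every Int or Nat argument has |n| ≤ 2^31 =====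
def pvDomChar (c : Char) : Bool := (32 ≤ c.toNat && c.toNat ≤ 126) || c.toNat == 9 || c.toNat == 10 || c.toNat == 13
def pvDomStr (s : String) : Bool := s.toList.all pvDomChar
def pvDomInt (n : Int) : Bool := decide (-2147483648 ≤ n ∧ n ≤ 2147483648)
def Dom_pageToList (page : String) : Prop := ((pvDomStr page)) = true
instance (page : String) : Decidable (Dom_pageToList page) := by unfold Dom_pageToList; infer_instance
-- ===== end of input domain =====

-- B replaces A's nested index loops with absolute-offset slicing by a single streaming pass: it
-- normalises the buffer to exactly 1960 chars (truncate + space-pad; rstrip erases the padding)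
-- and walks it char by char, closing a field every 20 chars and a row every 14 fields (alternative).

-- ===== PORT A =====
def pageToList (page : String) : List (List String) :=
  (PySem.List.pyRange 0 7 1).foldl (fun listOfRecords i =>
    listOfRecords ++
      [(PySem.List.pyRange 0 14 1).foldl (fun record j =>
          record ++ [PySem.Str.rstrip
            (PySem.Str.slice page (some (i*280 + j*20)) (some (i*280 + 20 + j*20)))]) []]) []

-- ===== PORT B =====
-- hand-ported s.ljust(1960): right-pad with ' ' to length 1960 (PySem has no ljust; exact, since
-- Python ljust never truncates and the default fill char is ' ')
def pvLjust (cs : List Char) (w : Nat) : List Char := cs ++ List.replicate (w - cs.length) ' '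

-- buf = page[:1960].ljust(1960)
def pvBuf (page : String) : List Char :=
  pvLjust (PySem.Str.slice page none (some 1960)).toList 1960

-- one iteration of B's for-loop body over the state (out, row, field); ''.join = String.ofList
def pvStep (s : List (List String) × List String × List Char) (ch : Char) :
    List (List String) × List String × List Char :=
  let field := s.2.2 ++ [ch]
  if field.length = 20 then
    let row := s.2.1 ++ [PySem.Str.rstrip (String.ofList field)]
    if row.length = 14 then (s.1 ++ [row], [], []) else (s.1, row, [])
  else (s.1, s.2.1, field)

def pageToList_alt (page : String) : List (List String) :=
  (List.foldl pvStep ([], [], []) (pvBuf page)).1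

-- ===== PRECONDITION & SPEC =====
def Spec_pageToList (page : String) (out : List (List String)) : Prop := out = pageToList_alt page
instance (page : String) (out : List (List String)) : Decidable (Spec_pageToList page out) := by unfold Spec_pageToList; infer_instance

-- ===== CLAIM (what is proved, stated in full; the proofs are below) =====
def Claim_equal_pageToList : Prop := ∀ (page : String), Dom_pageToList page → Spec_pageToList page (pageToList page)

-- ===== LEMMAS AND PROOFS =====

-- rstrip ignores a run of trailing spaces
lemma rstrip_spaces (xs : List Char) (k : Nat) :
    PySem.Chars.rstrip (xs ++ List.replicate k ' ') = PySem.Chars.rstrip xs := by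
  simp only [PySem.Chars.rstrip, List.reverse_append, List.reverse_replicate]
  congr 1
  induction k with
  | zero => simp
  | succ n ih =>
      rw [List.replicate_succ, List.cons_append, List.dropWhile_cons_of_pos (by decide)]
      exact ih

-- consuming one 20-char field from a state whose pending field f it completes
lemma fold_field (c : List Char) (out : List (List String)) (row : List String) (f : List Char)
    (h : f.length + c.length = 20) (hc : c ≠ []) :
    List.foldl pvStep (out, row, f) c =
      if row.length + 1 = 14 then
        (out ++ [row ++ [PySem.Str.rstrip (String.ofList (f ++ c))]], [], [])
      else (out, row ++ [PySem.Str.rstrip (String.ofList (f ++ c))], []) := by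
  induction c generalizing f with
  | nil => exact absurd rfl hc
  | cons ch rest ih =>
      rw [List.foldl_cons]
      cases rest with
      | nil =>
          have hl : f.length = 19 := by simp at h; omega
          simp only [pvStep, List.foldl_nil]
          simp [hl]
      | cons ch2 rest2 =>
          have hl : ¬ f.length = 19 := by simp at h; omega
          have hstep : pvStep (out, row, f) ch = (out, row, f ++ [ch]) := by
            simp [pvStep, hl]
          rw [hstep, ih (f := f ++ [ch]) (by simp at h ⊢; omega) (by simp)]
          simp

-- consuming a full row: cs are its 14 − row.length remaining fields, each 20 chars
lemma fold_row (cs : List (List Char)) (out : List (List String)) (row : List String)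
    (hne : cs ≠ []) (hlen : ∀ c ∈ cs, c.length = 20) (h14 : row.length + cs.length = 14) :
    List.foldl pvStep (out, row, []) cs.flatten =
      (out ++ [row ++ cs.map (fun c => PySem.Str.rstrip (String.ofList c))], [], []) := by
  induction cs generalizing out row with
  | nil => exact absurd rfl hne
  | cons c rest ih =>
      rw [List.flatten_cons, List.foldl_append]
      have hc : c ≠ [] := by
        intro e
        have := hlen c (by simp)
        rw [e] at this; simp at this
      rw [fold_field c out row [] (by simpa using hlen c (by simp)) hc]
      cases rest with
      | nil =>
          have h1 : row.length + 1 = 14 := by simpa using h14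
          simp [h1]
      | cons c2 rest2 =>
          have hne2 : ¬ row.length + 1 = 14 := by simp at h14; omega
          rw [if_neg hne2,
            ih out (row ++ [PySem.Str.rstrip (String.ofList ([] ++ c))]) (by simp)
              (fun d hd => hlen d (by simp [hd])) (by simp at h14 ⊢; omega)]
          simp

-- consuming all rows
lemma fold_rows (rss : List (List (List Char))) (out : List (List String))
    (h : ∀ rs ∈ rss, rs.length = 14 ∧ ∀ c ∈ rs, c.length = 20) :
    List.foldl pvStep (out, [], []) (rss.map List.flatten).flatten =
      (out ++ rss.map (fun rs => rs.map (fun c => PySem.Str.rstrip (String.ofList c))), [], []) := by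
  induction rss generalizing out with
  | nil => simp
  | cons rs rest ih =>
      rw [List.map_cons, List.flatten_cons, List.foldl_append]
      obtain ⟨h14, h20⟩ := h rs (by simp)
      have hne : rs ≠ [] := by intro e; rw [e] at h14; simp at h14
      rw [fold_row rs out [] hne h20 (by simpa using h14),
        ih _ (fun a ha => h a (by simp [ha]))]
      simp

-- a list of length m*n is the concatenation of its n m-chunks
lemma chunks_flatten {α : Type} (m n : Nat) (l : List α) (h : l.length = m * n) :
    ((List.range n).map (fun k => (l.drop (m*k)).take m)).flatten = l := by
  induction n generalizing l with
  | zero =>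
      simp only [Nat.mul_zero] at h
      simp [List.eq_nil_of_length_eq_zero h]
  | succ n ih =>
      rw [List.range_succ_eq_map, List.map_cons, List.map_map, List.flatten_cons]
      have hrest : ∀ k : Nat, (l.drop (m * Nat.succ k)).take m = ((l.drop m).drop (m*k)).take m := by
        intro k
        rw [List.drop_drop]
        have : m * Nat.succ k = m + m * k := by rw [Nat.mul_succ, Nat.add_comm]
        rw [this]
      have : ((List.range n).map ((fun k => (l.drop (m*k)).take m) ∘ Nat.succ))
          = (List.range n).map (fun k => ((l.drop m).drop (m*k)).take m) := by
        refine List.map_congr_left fun k _ => ?_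
        exact hrest k
      rw [this, ih (l.drop m) (by simp [h, Nat.mul_succ])]
      simp

-- taking a 20-window at offset b inside the 280-window at offset a
lemma chunk_chunk {α : Type} (l : List α) (a b : Nat) (hb : b + 20 ≤ 280) :
    (((l.drop a).take 280).drop b).take 20 = (l.drop (a + b)).take 20 := by
  rw [List.drop_take, List.drop_drop, List.take_take]
  have : min 20 (280 - b) = 20 := by omega
  rw [this]

-- the padded buffer, in take/replicate form, and its length
lemma pvBuf_eq (page : String) :
    pvBuf page = page.toList.take 1960 ++
      List.replicate (1960 - (page.toList.take 1960).length) ' ' := by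
  simp only [pvBuf, pvLjust, PySem.Str.toList_slice, PySem.Chars.slice_eq_listSlice]
  rw [PySem.List.slice_to page.toList (by norm_num : (0:Int) ≤ 1960)]
  have : (1960:Int).toNat = 1960 := rfl
  rw [this]

lemma pvBuf_length (page : String) : (pvBuf page).length = 1960 := by
  rw [pvBuf_eq]
  simp only [List.length_append, List.length_take, List.length_replicate]
  omega

-- rstrip of a 20-chunk of the padded buffer = rstrip of the raw 20-slice of the page
lemma pad_chunk (L : List Char) (a : Nat) (h : a + 20 ≤ 1960) :
    PySem.Chars.rstrip
        (((L.take 1960 ++ List.replicate (1960 - (L.take 1960).length) ' ').drop a).take 20)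
      = PySem.Chars.rstrip ((L.drop a).take 20) := by
  rw [List.drop_append, List.take_append,
    List.drop_replicate, List.take_replicate, rstrip_spaces]
  congr 1
  rw [List.drop_take, List.take_take]
  have : min 20 (1960 - a) = 20 := by omega
  rw [this]

-- A's field (i,j) equals B's field (i,j) as strings
lemma field_eq (page : String) (i j : Nat) (hi : i < 7) (hj : j < 14) :
    PySem.Str.rstrip (PySem.Str.slice page (some ((i:Int)*280 + (j:Int)*20))
        (some ((i:Int)*280 + 20 + (j:Int)*20)))
      = PySem.Str.rstrip (String.ofList (((pvBuf page).drop (i*280 + j*20)).take 20)) := by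
  have hA : PySem.Str.slice page (some ((i:Int)*280 + (j:Int)*20))
      (some ((i:Int)*280 + 20 + (j:Int)*20)) =
      String.ofList ((page.toList.drop (i*280 + j*20)).take 20) := by
    apply String.toList_inj.mp
    rw [PySem.Str.toList_slice]
    simp only [PySem.Chars.slice_eq_listSlice, String.toList_ofList]
    rw [PySem.List.slice_toNat _ (by positivity) (by positivity)]
    have e1 : ((i:Int)*280 + (j:Int)*20).toNat = i*280 + j*20 := by omega
    have e2 : ((i:Int)*280 + 20 + (j:Int)*20).toNat = i*280 + 20 + j*20 := by omega
    rw [e1, e2]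
    have e3 : i*280 + 20 + j*20 - (i*280 + j*20) = 20 := by omega
    rw [e3]
  rw [hA]
  have hb : (i*280 + j*20) + 20 ≤ 1960 := by omega
  apply String.toList_inj.mp
  rw [PySem.Str.toList_rstrip, PySem.Str.toList_rstrip, String.toList_ofList,
    String.toList_ofList, pvBuf_eq]
  exact (pad_chunk page.toList (i*280 + j*20) hb).symm

-- ===== VERDICT (by name: the statement is the Claim_ definition above) =====
theorem pageToList_spec : Claim_equal_pageToList := by
  intro page _
  unfold Spec_pageToList pageToList pageToList_alt
  -- A as a nested map over range 7 / range 14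
  simp only [PySem.List.foldl_append_singleton_eq_map, List.nil_append]
  rw [show (7:Int) = ((7:Nat):Int) from rfl, show (14:Int) = ((14:Nat):Int) from rfl]
  simp only [PySem.List.pyRange_zero_natCast, List.map_map, Function.comp_def]
  -- B: decompose the buffer into 7 rows of 14 chunks of 20 and run the streaming lemmas
  have hlen : ∀ i j : Nat, i < 7 → j < 14 →
      (((pvBuf page).drop (i*280 + j*20)).take 20).length = 20 := by
    intro i j hi hj
    have := pvBuf_length page
    simp [List.length_take, List.length_drop, this]
    omega
  have hbuf : ((((List.range 7).map (fun i => (List.range 14).map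
        (fun j => ((pvBuf page).drop (i*280 + j*20)).take 20))).map List.flatten).flatten)
      = pvBuf page := by
    have hrow : ∀ i : Nat, i < 7 →
        ((List.range 14).map (fun j => ((pvBuf page).drop (i*280 + j*20)).take 20)).flatten
          = ((pvBuf page).drop (i*280)).take 280 := by
      intro i hi
      have h280 : (((pvBuf page).drop (i*280)).take 280).length = 280 := by
        have := pvBuf_length page
        simp [List.length_take, List.length_drop, this]
        omega
      have := chunks_flatten 20 14 (((pvBuf page).drop (i*280)).take 280) (by rw [h280])
      rw [← this]
      refine congrArg _ (List.map_congr_left fun j hj => ?_)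
      rw [List.mem_range] at hj
      rw [chunk_chunk _ _ _ (by omega)]
      have e : i*280 + 20*j = i*280 + j*20 := by
        rw [Nat.mul_comm 20 j]
      rw [e]
    rw [List.map_map]
    have : ((List.range 7).map (List.flatten ∘ fun i => (List.range 14).map
        (fun j => ((pvBuf page).drop (i*280 + j*20)).take 20)))
        = (List.range 7).map (fun i => ((pvBuf page).drop (280*i)).take 280) := by
      refine List.map_congr_left fun i hi => ?_
      rw [List.mem_range] at hi
      have := hrow i hi
      simpa [Nat.mul_comm] using this
    rw [this]
    exact chunks_flatten 280 7 (pvBuf page) (pvBuf_length page)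
  rw [← hbuf, fold_rows _ [] ?cond]
  case cond =>
    intro rs hrs
    rw [List.mem_map] at hrs
    obtain ⟨i, hi, rfl⟩ := hrs
    rw [List.mem_range] at hi
    refine ⟨by simp, ?_⟩
    intro c hc
    rw [List.mem_map] at hc
    obtain ⟨j, hj, rfl⟩ := hc
    rw [List.mem_range] at hj
    exact hlen i j hi hj
  simp only [List.nil_append, List.map_map, Function.comp_def]
  refine List.map_congr_left fun i hi => List.map_congr_left fun j hj => ?_
  rw [List.mem_range] at hi hj
  exact field_eq page i j hi hj
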